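-- pv_equiv track=rewrite | github.com/Alysseum17/ASD-labs | LAB51/part2.py | bfs_tree_edges
-- ===== SOURCE A (Python) =====
-- def bfs_tree_edges(adj):
--
--     n = len(adj)
--     visited = [False]*n
--     edges = []
--
--     for s in range(n):
--
--         if not visited[s] and any(adj[s][j] for j in range(n)):
--             visited[s] = True
--             queue = [s]
--             while queue:
--                 u = queue.pop(0)
--                 for v in range(n):
--                     if adj[u][v] and not visited[v]:
--                         visited[v] = True
--                         edges.append((u,v))
--                         queue.append(v)
--     return edges
-- ===== SOURCE B (Python) =====
-- def bfs_tree_edges(adj):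
--     n = len(adj)
--     remaining = list(range(n))   # worklist of still-undiscovered vertices (no visited array)
--     edges = []
--     for s in range(n):
--         if s in remaining and any(adj[s][j] for j in range(n)):
--             remaining = [v for v in remaining if v != s]
--             order = [s]          # discovery order; scanned by a cursor, never popped
--             i = 0
--             while i < len(order):
--                 u = order[i]
--                 i += 1
--                 kids = [v for v in remaining if adj[u][v]]
--                 remaining = [v for v in remaining if not adj[u][v]]
--                 edges += [(u, v) for v in kids]
--                 order += kids
--     return edges
-- ===== Notes on version B (the rewrite author's own statement) =====
-- stated objective: faster
-- what changed: Replaces the visited boolean array + pop(0) queue by a shrinking worklist of undiscovered vertices: each parent's children are computed wholesale by filtering the worklist (no per-vertex visited check over range(n)), and parents are read off a growing discovery-order list with a cursor instead of being popped from a queue.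
import Mathlib
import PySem

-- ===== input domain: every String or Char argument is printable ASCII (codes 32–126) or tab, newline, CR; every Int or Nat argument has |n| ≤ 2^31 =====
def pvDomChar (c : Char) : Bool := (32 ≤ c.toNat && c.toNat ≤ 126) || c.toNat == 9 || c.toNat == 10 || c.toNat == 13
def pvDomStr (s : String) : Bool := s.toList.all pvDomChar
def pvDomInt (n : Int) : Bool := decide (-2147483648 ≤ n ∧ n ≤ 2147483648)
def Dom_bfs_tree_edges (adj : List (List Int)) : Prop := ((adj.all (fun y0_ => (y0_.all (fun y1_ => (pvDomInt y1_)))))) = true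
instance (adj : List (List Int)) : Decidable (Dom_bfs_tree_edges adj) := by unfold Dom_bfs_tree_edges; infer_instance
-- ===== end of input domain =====

-- B replaces A's visited array + pop(0) queue by a shrinking worklist of undiscovered
-- vertices (children found by filtering the worklist) and a cursor over a growing
-- discovery-order list; same edges in the same order (measurably faster on the timed inputs).
-- Indexing adj[u][v]/visited[v] is ported with List.getD: within Pre_ all reached
-- indices are in range, so getD is exact there.  A's `fuel` argument is only a
-- totalization guard; the port passes 2*#unvisited + |queue|, never exhausted.

-- ===== PORT A =====
-- number of False entries of `visited` (used only to compute the fuel bound)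
def pvCountF (vis : List Bool) : Nat := vis.count false

-- A's inner loop `for v in range(n): if adj[u][v] and not visited[v]: ...`;
-- state = (visited, edges, queue being appended to)
def pvScan (adj : List (List Int)) (u : Nat) (vs : List Nat)
    (st : List Bool × List (Int × Int) × List Nat) :
    List Bool × List (Int × Int) × List Nat :=
  vs.foldl (fun st v =>
    if (adj.getD u []).getD v 0 ≠ 0 ∧ st.1.getD v false = false then
      (st.1.set v true, st.2.1 ++ [((u : Int), (v : Int))], st.2.2 ++ [v])
    else st) st

-- A's `while queue:` loop with `u = queue.pop(0)` (fuel = totalization guard only)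
def pvLoopA (adj : List (List Int)) (n : Nat) :
    Nat → List Bool → List (Int × Int) → List Nat → List Bool × List (Int × Int)
  | _, vis, ed, [] => (vis, ed)
  | 0, vis, ed, _ :: _ => (vis, ed)
  | fuel + 1, vis, ed, u :: rest =>
    let r := pvScan adj u (List.range n) (vis, ed, rest)
    pvLoopA adj n fuel r.1 r.2.1 r.2.2

-- A's outer `for s in range(n):` loop with the root guard
def pvOuterA (adj : List (List Int)) (n : Nat) :
    List Nat → List Bool → List (Int × Int) → List (Int × Int)
  | [], _, ed => ed
  | s :: rest, vis, ed =>
    if vis.getD s false = false ∧ (List.range n).any (fun j => (adj.getD s []).getD j 0 ≠ 0) then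
      let r := pvLoopA adj n (2 * pvCountF (vis.set s true) + 1) (vis.set s true) ed [s]
      pvOuterA adj n rest r.1 r.2
    else pvOuterA adj n rest vis ed

def bfs_tree_edges (adj : List (List Int)) : List (Int × Int) :=
  pvOuterA adj adj.length (List.range adj.length) (List.replicate adj.length false) []

-- ===== PORT B =====
-- length is preserved when a list is split by a predicate and its negation
theorem pvFilterSplitLen (p : Nat → Bool) (l : List Nat) :
    (l.filter p).length + (l.filter (fun v => !(p v))).length = l.length := by
  induction l with
  | nil => rfl
  | cons x xs ih => cases h : p x <;> simp [h] <;> omega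

-- B's `while i < len(order):` loop; state = (order, cursor i, remaining, edges);
-- `kids = [v for v in remaining if adj[u][v]]`, `remaining` refiltered, both appended
def pvLoopB (adj : List (List Int)) (order : List Nat) (i : Nat)
    (remaining : List Nat) (edges : List (Int × Int)) : List (Int × Int) × List Nat :=
  -- u = order[i]; kids = [v for v in remaining if adj[u][v]] (inlined below)
  if _h : i < order.length then
    pvLoopB adj
      (order ++ remaining.filter (fun v => (adj.getD (order.getD i 0) []).getD v 0 != 0))
      (i + 1)
      (remaining.filter (fun v => !((adj.getD (order.getD i 0) []).getD v 0 != 0)))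
      (edges ++ (remaining.filter (fun v => (adj.getD (order.getD i 0) []).getD v 0 != 0)).map
        (fun v => ((order.getD i 0 : Int), (v : Int))))
  else (edges, remaining)
  termination_by remaining.length + (order.length - i)
  decreasing_by
    have := pvFilterSplitLen (fun v => (adj.getD (order.getD i 0) []).getD v 0 != 0) remaining
    simp only [List.length_append, List.unattach_filter, List.unattach_attach]
    omega

-- B's outer `for s in range(n):` loop (worklist `remaining` instead of a visited array)
def pvOuterB (adj : List (List Int)) (n : Nat) :
    List Nat → List Nat → List (Int × Int) → List (Int × Int)
  | [], _, ed => ed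
  | s :: ss, rem, ed =>
    if s ∈ rem ∧ (List.range n).any (fun j => (adj.getD s []).getD j 0 ≠ 0) then
      let r := pvLoopB adj [s] 0 (rem.filter (fun v => v != s)) ed
      pvOuterB adj n ss r.2 r.1
    else pvOuterB adj n ss rem ed

def bfs_tree_edges_alt (adj : List (List Int)) : List (Int × Int) :=
  pvOuterB adj adj.length (List.range adj.length) (List.range adj.length) []

-- ===== PRECONDITION & SPEC =====
-- Pre_ excludes ragged matrices with a row shorter than len(adj): Python A raises
-- IndexError there; nothing else is excluded.
def Pre_bfs_tree_edges (adj : List (List Int)) : Prop :=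
  ∀ row ∈ adj, adj.length ≤ row.length
instance (adj : List (List Int)) : Decidable (Pre_bfs_tree_edges adj) := by
  unfold Pre_bfs_tree_edges; infer_instance

def pvWitness_bfs_tree_edges : List (List Int) := [[0, 1, 0], [1, 0, 1], [0, 0, 0]]

def Spec_bfs_tree_edges (adj : List (List Int)) (out : List (Int × Int)) : Prop := out = bfs_tree_edges_alt adj
instance (adj : List (List Int)) (out : List (Int × Int)) : Decidable (Spec_bfs_tree_edges adj out) := by unfold Spec_bfs_tree_edges; infer_instance

-- ===== CLAIM (what is proved, stated in full; the proofs are below) =====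
def Claim_equal_bfs_tree_edges : Prop := ∀ (adj : List (List Int)), Dom_bfs_tree_edges adj → Pre_bfs_tree_edges adj → Spec_bfs_tree_edges adj (bfs_tree_edges adj)

-- ===== LEMMAS AND PROOFS =====

-- the still-undiscovered vertices, in ascending order (B's `remaining`)
def pvUnvis (vis : List Bool) (n : Nat) : List Nat :=
  (List.range n).filter (fun v => vis.getD v false == false)

-- mark a batch of vertices visited
def pvSetAll (vis : List Bool) (ks : List Nat) : List Bool :=
  ks.foldl (fun w k => w.set k true) vis

theorem pvGetD_set_ne (vis : List Bool) (v w : Nat) (b : Bool) (h : w ≠ v) :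
    (vis.set v b).getD w false = vis.getD w false := by
  simp [List.getD_eq_getElem?_getD, List.getElem?_set_ne (Ne.symm h)]

theorem pvGetD_set_self (vis : List Bool) (v : Nat) (b : Bool) (h : v < vis.length) :
    (vis.set v b).getD v false = b := by
  simp [List.getD_eq_getElem?_getD, List.getElem?_set_self h]

theorem pvScan_len (adj : List (List Int)) (u : Nat) (vs : List Nat)
    (st : List Bool × List (Int × Int) × List Nat) :
    (pvScan adj u vs st).1.length = st.1.length := by
  induction vs generalizing st with
  | nil => rfl
  | cons v vs ih =>
    simp only [pvScan, List.foldl_cons] at *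
    rw [ih]
    split <;> simp

theorem pvCountF_set (vis : List Bool) (v : Nat) (hv : v < vis.length)
    (hf : vis.getD v false = false) :
    pvCountF (vis.set v true) + 1 = pvCountF vis := by
  induction vis generalizing v with
  | nil => simp at hv
  | cons b t ih =>
    cases v with
    | zero => simp at hf; simp [pvCountF, hf]
    | succ v =>
      simp at hv hf
      have := ih v hv hf
      simp [pvCountF, List.count_cons] at *
      omega

theorem pvScan_count (adj : List (List Int)) (u : Nat) (vs : List Nat)
    (st : List Bool × List (Int × Int) × List Nat)
    (hvs : ∀ v ∈ vs, v < st.1.length) :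
    pvCountF (pvScan adj u vs st).1 + (pvScan adj u vs st).2.2.length
      = pvCountF st.1 + st.2.2.length
    ∧ pvCountF (pvScan adj u vs st).1 ≤ pvCountF st.1 := by
  induction vs generalizing st with
  | nil => exact ⟨rfl, le_refl _⟩
  | cons v vs ih =>
    simp only [pvScan, List.foldl_cons] at *
    have hv := hvs v (by simp)
    split
    · next hcond =>
      have h2 := pvCountF_set st.1 v hv hcond.2
      have h1 := ih (st.1.set v true, st.2.1 ++ [((u : Int), (v : Int))], st.2.2 ++ [v])
        (by intro w hw; simpa using hvs w (by simp [hw]))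
      simp only [List.length_append, List.length_cons, List.length_nil] at h1
      exact ⟨by omega, by omega⟩
    · exact ih st (fun w hw => hvs w (by simp [hw]))

-- A's inner scan characterised: it marks, records and enqueues exactly the
-- vertices of `vs` that are adjacent and still unvisited (w.r.t. the ENTRY state)
theorem pvScan_char (adj : List (List Int)) (u : Nat) (vs : List Nat)
    (vis : List Bool) (ed : List (Int × Int)) (q : List Nat) (hnd : vs.Nodup) :
    pvScan adj u vs (vis, ed, q)
      = (pvSetAll vis (vs.filter (fun v =>
            ((adj.getD u []).getD v 0 != 0) && (vis.getD v false == false))),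
         ed ++ (vs.filter (fun v =>
            ((adj.getD u []).getD v 0 != 0) && (vis.getD v false == false))).map
              (fun v => ((u : Int), (v : Int))),
         q ++ vs.filter (fun v =>
            ((adj.getD u []).getD v 0 != 0) && (vis.getD v false == false))) := by
  induction vs generalizing vis ed q with
  | nil => simp [pvScan, pvSetAll]
  | cons v vs ih =>
    have hv : v ∉ vs := (List.nodup_cons.mp hnd).1
    have hnd' : vs.Nodup := (List.nodup_cons.mp hnd).2
    by_cases hc : (adj.getD u []).getD v 0 ≠ 0 ∧ vis.getD v false = false
    · have hb : (((adj.getD u []).getD v 0 != 0) && (vis.getD v false == false)) = true := by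
        simp only [Bool.and_eq_true, bne_iff_ne, beq_iff_eq]
        exact ⟨hc.1, hc.2⟩
      have hfe : vs.filter (fun w =>
            ((adj.getD u []).getD w 0 != 0) && ((vis.set v true).getD w false == false))
          = vs.filter (fun w =>
            ((adj.getD u []).getD w 0 != 0) && (vis.getD w false == false)) := by
        apply List.filter_congr
        intro w hw
        rw [pvGetD_set_ne vis v w true (fun he => hv (he ▸ hw))]
      have hstep : pvScan adj u (v :: vs) (vis, ed, q)
          = pvScan adj u vs (vis.set v true, ed ++ [((u : Int), (v : Int))], q ++ [v]) := by
        simp only [pvScan, List.foldl_cons, if_pos hc]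
      have hfc : List.filter (fun w =>
            ((adj.getD u []).getD w 0 != 0) && (vis.getD w false == false)) (v :: vs)
          = v :: List.filter (fun w =>
            ((adj.getD u []).getD w 0 != 0) && (vis.getD w false == false)) vs := by
        rw [List.filter_cons, if_pos hb]
      rw [hstep, ih (vis.set v true) (ed ++ [((u : Int), (v : Int))]) (q ++ [v]) hnd', hfe, hfc]
      simp [pvSetAll]
    · have hb : (((adj.getD u []).getD v 0 != 0) && (vis.getD v false == false)) = false := by
        cases h1 : (adj.getD u []).getD v 0 != 0 <;>
          cases h2 : vis.getD v false == false <;>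
          simp_all [bne_iff_ne]
      have hstep : pvScan adj u (v :: vs) (vis, ed, q) = pvScan adj u vs (vis, ed, q) := by
        simp only [pvScan, List.foldl_cons, if_neg hc]
      have hfc : List.filter (fun w =>
            ((adj.getD u []).getD w 0 != 0) && (vis.getD w false == false)) (v :: vs)
          = List.filter (fun w =>
            ((adj.getD u []).getD w 0 != 0) && (vis.getD w false == false)) vs := by
        exact List.filter_cons_of_neg (by rw [hb]; exact Bool.false_ne_true)
      rw [hstep, ih vis ed q hnd', hfc]


-- the scanned kids over range n = B's filter of the worklist
theorem pvKids_eq (adj : List (List Int)) (u : Nat) (vis : List Bool) (n : Nat) :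
    (List.range n).filter (fun v =>
        ((adj.getD u []).getD v 0 != 0) && (vis.getD v false == false))
      = (pvUnvis vis n).filter (fun v => (adj.getD u []).getD v 0 != 0) := by
  unfold pvUnvis
  rw [List.filter_filter]

theorem pvSetAll_getD (ks : List Nat) (vis : List Bool) (w : Nat)
    (hks : ∀ k ∈ ks, k < vis.length) :
    (pvSetAll vis ks).getD w false = (decide (w ∈ ks) || vis.getD w false) := by
  induction ks generalizing vis with
  | nil => simp [pvSetAll]
  | cons k ks ih =>
    have hk := hks k (by simp)
    have := ih (vis.set k true) (by intro x hx; simpa using hks x (by simp [hx]))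
    simp only [pvSetAll, List.foldl_cons] at *
    rw [this]
    by_cases hw : w = k
    · subst hw
      rw [pvGetD_set_self vis w true hk]
      simp
    · rw [pvGetD_set_ne vis k w true hw]
      simp [List.mem_cons, hw]

-- after marking the kids, the worklist is B's refiltered `remaining`
theorem pvUnvis_setAll (adj : List (List Int)) (u : Nat) (vis : List Bool) (n : Nat)
    (hlen : vis.length = n) :
    pvUnvis (pvSetAll vis
        ((pvUnvis vis n).filter (fun v => (adj.getD u []).getD v 0 != 0))) n
      = (pvUnvis vis n).filter (fun v => !((adj.getD u []).getD v 0 != 0)) := by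
  have hks : ∀ k ∈ (pvUnvis vis n).filter (fun v => (adj.getD u []).getD v 0 != 0),
      k < vis.length := by
    intro k hk
    have := List.mem_range.mp (List.mem_filter.mp (List.mem_filter.mp hk).1).1
    omega
  have hrhs : (pvUnvis vis n).filter (fun v => !((adj.getD u []).getD v 0 != 0))
      = (List.range n).filter (fun v =>
          (!((adj.getD u []).getD v 0 != 0)) && (vis.getD v false == false)) := by
    unfold pvUnvis
    rw [List.filter_filter]
  rw [hrhs]
  show (List.range n).filter (fun v => (pvSetAll vis
        ((pvUnvis vis n).filter (fun w => (adj.getD u []).getD w 0 != 0))).getD v false == false)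
      = _
  apply List.filter_congr
  intro v hv
  rw [pvSetAll_getD _ vis v hks]
  by_cases hm : v ∈ (pvUnvis vis n).filter (fun w => (adj.getD u []).getD w 0 != 0)
  · have hd := decide_eq_true hm
    have h1 : ((adj.getD u []).getD v 0 != 0) = true := (List.mem_filter.mp hm).2
    rw [bne_iff_ne, List.getD_eq_getElem?_getD] at h1
    simp only [hd]
    simp
    intro hx
    exact absurd hx h1
  · have hd := decide_eq_false hm
    by_cases h2 : vis.getD v false = false
    · have h1 : ((adj.getD u []).getD v 0 != 0) = false := by
        cases hp : ((adj.getD u []).getD v 0 != 0)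
        · rfl
        · exact absurd (List.mem_filter.mpr
            ⟨List.mem_filter.mpr ⟨hv, by rw [h2]; rfl⟩, hp⟩) hm
      rw [bne_eq_false_iff_eq, List.getD_eq_getElem?_getD] at h1
      simp only [hd]
      simp
      intro _
      exact h1
    · have h2' : vis.getD v false = true := by
        cases h : vis.getD v false
        · exact absurd h h2
        · rfl
      rw [List.getD_eq_getElem?_getD] at h2'
      simp only [hd]
      simp
      intro hx
      rw [h2'] at hx
      exact absurd hx (by simp)

theorem pvLoopA_nil (adj : List (List Int)) (n : Nat) (fuel : Nat)
    (vis : List Bool) (ed : List (Int × Int)) :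
    pvLoopA adj n fuel vis ed [] = (vis, ed) := by
  cases fuel <;> rfl

-- MAIN LEMMA: A's queue loop (on suffix `order.drop i`, enough fuel) computes
-- B's cursor loop's edges, and its visited array denotes B's final worklist
theorem pvLoopA_eq_B (adj : List (List Int)) (n : Nat) :
    ∀ (fuel : Nat) (order : List Nat) (i : Nat) (vis : List Bool) (ed : List (Int × Int)),
      vis.length = n → (∀ v ∈ order, v < n) →
      2 * pvCountF vis + (order.length - i) ≤ fuel →
      (pvLoopA adj n fuel vis ed (order.drop i)).2
          = (pvLoopB adj order i (pvUnvis vis n) ed).1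
      ∧ pvUnvis (pvLoopA adj n fuel vis ed (order.drop i)).1 n
          = (pvLoopB adj order i (pvUnvis vis n) ed).2 := by
  intro fuel
  induction fuel with
  | zero =>
    intro order i vis ed hlen horder hf
    have hi : order.length ≤ i := by omega
    rw [List.drop_eq_nil_of_le hi, pvLoopA_nil, pvLoopB]
    simp [Nat.not_lt.mpr hi]
  | succ fuel ih =>
    intro order i vis ed hlen horder hf
    by_cases hi : i < order.length
    · -- one step of both loops
      obtain ⟨u, rest, hdrop⟩ : ∃ u rest, order.drop i = u :: rest := by
        cases h : order.drop i with
        | nil => exact absurd (List.drop_eq_nil_iff.mp h) (by omega)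
        | cons u rest => exact ⟨u, rest, rfl⟩
      have hu : order.getD i 0 = u := by
        have h0 : order[i + 0]? = some u := by
          rw [← List.getElem?_drop, hdrop]
          rfl
        simp only [Nat.add_zero] at h0
        simp [List.getD_eq_getElem?_getD, h0]
      have hrest : order.drop (i + 1) = rest := by
        rw [← List.drop_drop, hdrop]; rfl
      have humem : u ∈ order := by
        have : u ∈ order.drop i := by simp [hdrop]
        exact List.mem_of_mem_drop this
      set kids := (pvUnvis vis n).filter (fun v => (adj.getD u []).getD v 0 != 0) with hkids
      have hchar := pvScan_char adj u (List.range n) vis ed rest (List.nodup_range)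
      rw [pvKids_eq, ← hkids] at hchar
      -- fuel accounting
      have hscnt := pvScan_count adj u (List.range n) (vis, ed, rest)
        (by intro v hv; simp only [List.mem_range] at hv; show v < vis.length; omega)
      have hcnt2 : pvCountF (pvSetAll vis kids) + kids.length = pvCountF vis := by
        have := hscnt.1
        rw [hchar] at this
        simp only [List.length_append] at this
        omega
      -- lengths and memberships for the induction hypothesis
      have hlen2 : (pvSetAll vis kids).length = n := by
        have := pvScan_len adj u (List.range n) (vis, ed, rest)
        rw [hchar] at this
        simpa [hlen] using this
      have hkmem : ∀ v ∈ kids, v < n := by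
        intro v hv
        exact List.mem_range.mp (List.mem_filter.mp (List.mem_filter.mp hv).1).1
      have horder2 : ∀ v ∈ order ++ kids, v < n := by
        intro v hv
        rcases List.mem_append.mp hv with h | h
        · exact horder v h
        · exact hkmem v h
      have hf2 : 2 * pvCountF (pvSetAll vis kids) + ((order ++ kids).length - (i + 1)) ≤ fuel := by
        simp only [List.length_append]
        omega
      have hIH := ih (order ++ kids) (i + 1) (pvSetAll vis kids)
        (ed ++ kids.map (fun v => ((u : Int), (v : Int)))) hlen2 horder2 hf2
      -- unfold one step of A
      have hA : pvLoopA adj n (fuel + 1) vis ed (order.drop i)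
          = pvLoopA adj n fuel (pvSetAll vis kids)
              (ed ++ kids.map (fun v => ((u : Int), (v : Int)))) (rest ++ kids) := by
        rw [hdrop]
        show pvLoopA adj n fuel (pvScan adj u (List.range n) (vis, ed, rest)).1
            (pvScan adj u (List.range n) (vis, ed, rest)).2.1
            (pvScan adj u (List.range n) (vis, ed, rest)).2.2 = _
        rw [hchar]
      -- unfold one step of B
      have hB : pvLoopB adj order i (pvUnvis vis n) ed
          = pvLoopB adj (order ++ kids) (i + 1)
              ((pvUnvis vis n).filter (fun v => !((adj.getD u []).getD v 0 != 0)))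
              (ed ++ kids.map (fun v => ((u : Int), (v : Int)))) := by
        rw [pvLoopB]
        simp only [hi, dite_true, hu, ← hkids]
      have hdrop2 : (order ++ kids).drop (i + 1) = rest ++ kids := by
        rw [List.drop_append_of_le_length (by omega), hrest]
      rw [hA, hB, ← hdrop2, ← pvUnvis_setAll adj u vis n hlen]
      exact hIH
    · -- both loops stop
      have hdropnil : order.drop i = [] := List.drop_eq_nil_of_le (by omega)
      rw [hdropnil, pvLoopA_nil, pvLoopB]
      simp [hi]

theorem pvLoopA_len (adj : List (List Int)) (n : Nat) :
    ∀ (fuel : Nat) (vis : List Bool) (ed : List (Int × Int)) (q : List Nat),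
      (pvLoopA adj n fuel vis ed q).1.length = vis.length := by
  intro fuel
  induction fuel with
  | zero => intro vis ed q; cases q <;> rfl
  | succ fuel ih =>
    intro vis ed q
    cases q with
    | nil => rfl
    | cons u rest =>
      show (pvLoopA adj n fuel
          (pvScan adj u (List.range n) (vis, ed, rest)).1
          (pvScan adj u (List.range n) (vis, ed, rest)).2.1
          (pvScan adj u (List.range n) (vis, ed, rest)).2.2).1.length = vis.length
      rw [ih, pvScan_len]

-- removing the root from the worklist = marking it in the visited array
theorem pvUnvis_set (vis : List Bool) (n s : Nat) (hs : s < n) (hlen : vis.length = n) :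
    pvUnvis (vis.set s true) n = (pvUnvis vis n).filter (fun v => v != s) := by
  unfold pvUnvis
  rw [List.filter_filter]
  apply List.filter_congr
  intro v _
  by_cases hv : v = s
  · subst hv
    rw [pvGetD_set_self vis v true (by omega)]
    simp
  · rw [pvGetD_set_ne vis s v true hv]
    simp [hv]

-- the identical outer loops, through the visited-array/worklist correspondence
theorem pvOuter_eq (adj : List (List Int)) (n : Nat) :
    ∀ (ss : List Nat) (vis : List Bool) (ed : List (Int × Int)),
      vis.length = n → (∀ s ∈ ss, s < n) →
      pvOuterA adj n ss vis ed = pvOuterB adj n ss (pvUnvis vis n) ed := by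
  intro ss
  induction ss with
  | nil => intro vis ed h hs; rfl
  | cons s rest ih =>
    intro vis ed hlen hs
    have hsn : s < n := hs s List.mem_cons_self
    have hguard : (vis.getD s false = false) ↔ s ∈ pvUnvis vis n := by
      unfold pvUnvis
      simp [List.mem_filter, List.mem_range, hsn]
    rw [pvOuterA, pvOuterB]
    by_cases hg : vis.getD s false = false ∧
        (List.range n).any (fun j => (adj.getD s []).getD j 0 ≠ 0)
    · rw [if_pos hg, if_pos ⟨hguard.mp hg.1, hg.2⟩]
      have hset : (vis.set s true).length = n := by simpa using hlen
      have hAB := pvLoopA_eq_B adj n (2 * pvCountF (vis.set s true) + 1) [s] 0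
        (vis.set s true) ed hset (by intro v hv; simp at hv; omega) (by simp)
      rw [List.drop_zero] at hAB
      have hlen2 : (pvLoopA adj n (2 * pvCountF (vis.set s true) + 1)
          (vis.set s true) ed [s]).1.length = n := by
        rw [pvLoopA_len]; exact hset
      rw [ih _ _ hlen2 (fun t ht => hs t (List.mem_cons_of_mem s ht))]
      rw [pvUnvis_set vis n s hsn hlen] at hAB
      rw [hAB.1, hAB.2]
    · rw [if_neg hg, if_neg (by
        intro ⟨h1, h2⟩
        exact hg ⟨hguard.mpr h1, h2⟩)]
      exact ih vis ed hlen (fun t ht => hs t (List.mem_cons_of_mem s ht))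

theorem pvUnvis_replicate (n : Nat) :
    pvUnvis (List.replicate n false) n = List.range n := by
  unfold pvUnvis
  apply List.filter_eq_self.mpr
  intro v _
  simp [List.getD_eq_getElem?_getD]

-- ===== VERDICT (by name: the statement is the Claim_ definition above) =====
theorem bfs_tree_edges_spec : Claim_equal_bfs_tree_edges := by
  intro adj _ _
  show bfs_tree_edges adj = bfs_tree_edges_alt adj
  unfold bfs_tree_edges bfs_tree_edges_alt
  have h := pvOuter_eq adj adj.length (List.range adj.length)
    (List.replicate adj.length false) [] (by simp)
    (fun s hs => List.mem_range.mp hs)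
  rw [pvUnvis_replicate adj.length] at h
  exact h
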